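-- pv_equiv track=rewrite | github.com/danieleschmidt/protein-diffusion-design-lab | src/protein_diffusion/revolutionary_research_framework.py | _find_charged_regions
-- ===== SOURCE A (Python) =====
-- from typing import Dict, List, Any, Optional, Callable, Union, Tuple, Set
--
-- def _find_charged_regions(sequence: str) -> List[Tuple[int, int]]:
--     """Find charged regions in sequence."""
--     charged = "DEKR"
--     regions = []
--
--     start = None
--     for i, aa in enumerate(sequence):
--         if aa in charged:
--             if start is None:
--                 start = i
--         else:
--             if start is not None:
--                 if i - start >= 2:  # Minimum region size
--                     regions.append((start, i))
--                 start = None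
--
--     # Handle end of sequence
--     if start is not None and len(sequence) - start >= 2:
--         regions.append((start, len(sequence)))
--
--     return regions
-- ===== SOURCE B (Python) =====
-- def _find_charged_regions(sequence: str):
--     """Find charged regions in sequence (run-scanning two-pointer version)."""
--     charged = set("DEKR")
--     regions = []
--     i, n = 0, len(sequence)
--     while i < n:
--         if sequence[i] in charged:
--             j = i + 1
--             while j < n and sequence[j] in charged:
--                 j += 1
--             if j - i >= 2:
--                 regions.append((i, j))
--             i = j
--         else:
--             i += 1
--     return regions
-- ===== Notes on version B (the rewrite author's own statement) =====
-- stated objective: alternative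
-- what changed: Replaced the start/None state machine over enumerate with a two-pointer run scanner: at each charged residue an inner loop advances to the end of the maximal run, the run is emitted if its length is >= 2, and scanning resumes after the run.
import Mathlib
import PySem

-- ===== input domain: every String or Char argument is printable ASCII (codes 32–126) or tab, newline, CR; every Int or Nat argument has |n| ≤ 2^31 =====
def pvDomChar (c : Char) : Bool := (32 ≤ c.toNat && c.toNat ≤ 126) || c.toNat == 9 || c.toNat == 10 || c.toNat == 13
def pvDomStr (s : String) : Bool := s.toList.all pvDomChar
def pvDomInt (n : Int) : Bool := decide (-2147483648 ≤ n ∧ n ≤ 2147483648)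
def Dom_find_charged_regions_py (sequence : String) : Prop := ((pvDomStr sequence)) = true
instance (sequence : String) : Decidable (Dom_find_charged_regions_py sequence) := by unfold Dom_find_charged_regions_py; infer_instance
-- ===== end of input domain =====

-- B replaces A's start/None state machine with a two-pointer run scanner (alternative decomposition, same O(n) cost).


-- ===== PORT A =====
-- `aa in "DEKR"` for a single character aa is exactly membership in the four characters (exact for 1-char substrings)
def pvCharged (c : Char) : Bool := c == 'D' || c == 'E' || c == 'K' || c == 'R'

-- the body of A's for-loop: state = (start, regions)
def pvStepA (st : Option Int × List (Int × Int)) (p : Int × Char) : Option Int × List (Int × Int) :=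
  if pvCharged p.2 then
    match st.1 with
    | none => (some p.1, st.2)
    | some s => (some s, st.2)
  else
    match st.1 with
    | some s => (none, if 2 ≤ p.1 - s then st.2 ++ [(s, p.1)] else st.2)
    | none => (none, st.2)

-- A's trailing "handle end of sequence" step
def pvFinA (n : Int) (st : Option Int × List (Int × Int)) : List (Int × Int) :=
  match st.1 with
  | some s => if 2 ≤ n - s then st.2 ++ [(s, n)] else st.2
  | none => st.2

def find_charged_regions_py (sequence : String) : List (Int × Int) :=
  pvFinA (PySem.Str.len sequence)
    ((PySem.List.enumerate sequence.toList 0).foldl pvStepA (none, []))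

-- ===== PORT B =====
-- B's outer while-loop; the inner `while j < n and sequence[j] in charged: j += 1` is the
-- takeWhile-length computation of the maximal charged run starting at position i
def pvGoB : List Char → Nat → List (Int × Int)
  | [], _ => []
  | c :: rest, i =>
    if pvCharged c then
      -- run length k = j - i = (takeWhile charged rest).length + 1
      (if 2 ≤ (rest.takeWhile pvCharged).length + 1 then
          [((i : Int), ((i + ((rest.takeWhile pvCharged).length + 1) : Nat) : Int))] else []) ++
        pvGoB (rest.dropWhile pvCharged) (i + ((rest.takeWhile pvCharged).length + 1))
    else pvGoB rest (i + 1)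
termination_by l _ => l.length
decreasing_by
  · simpa using Nat.lt_succ_of_le (List.length_dropWhile_le _ _)
  · simp

def find_charged_regions_py_alt (sequence : String) : List (Int × Int) :=
  pvGoB sequence.toList 0

-- ===== PRECONDITION & SPEC =====
def Spec_find_charged_regions_py (sequence : String) (out : List (Int × Int)) : Prop := out = find_charged_regions_py_alt sequence
instance (sequence : String) (out : List (Int × Int)) : Decidable (Spec_find_charged_regions_py sequence out) := by unfold Spec_find_charged_regions_py; infer_instance

-- ===== CLAIM (what is proved, stated in full; the proofs are below) =====
def Claim_equal_find_charged_regions_py : Prop := ∀ (sequence : String), Dom_find_charged_regions_py sequence → Spec_find_charged_regions_py sequence (find_charged_regions_py sequence)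

-- ===== LEMMAS AND PROOFS =====

-- Mutual loop invariant, by strong induction on the suffix length:
--   · with start = None, finishing A's fold over the suffix yields acc ++ the runs B finds there;
--   · with start = some s, A is inside a run begun at s: the run ends after the charged prefix of
--     the suffix, is emitted iff its length is ≥ 2, and scanning continues as in B.
lemma pvMain : ∀ (N : Nat) (l : List Char), l.length ≤ N →
    (∀ (i : Nat) (acc : List (Int × Int)),
      pvFinA ((i + l.length : Nat) : Int)
        ((PySem.List.enumerate l (i : Int)).foldl pvStepA (none, acc)) = acc ++ pvGoB l i) ∧
    (∀ (i : Nat) (acc : List (Int × Int)) (s : Int),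
      pvFinA ((i + l.length : Nat) : Int)
        ((PySem.List.enumerate l (i : Int)).foldl pvStepA (some s, acc))
        = acc ++ (if 2 ≤ ((i + (l.takeWhile pvCharged).length : Nat) : Int) - s
                   then [(s, ((i + (l.takeWhile pvCharged).length : Nat) : Int))] else [])
              ++ pvGoB (l.dropWhile pvCharged) (i + (l.takeWhile pvCharged).length)) := by
  intro N
  induction N with
  | zero =>
    intro l hl
    have : l = [] := List.length_eq_zero_iff.mp (Nat.le_zero.mp hl)
    subst this
    refine ⟨fun i acc => by simp [PySem.List.enumerate, pvFinA, pvGoB],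
            fun i acc s => by simp [PySem.List.enumerate, pvFinA]; split_ifs <;> simp [pvGoB]⟩
  | succ N ih =>
    intro l hl
    match l with
    | [] =>
      refine ⟨fun i acc => by simp [PySem.List.enumerate, pvFinA, pvGoB],
              fun i acc s => by simp [PySem.List.enumerate, pvFinA]; split_ifs <;> simp [pvGoB]⟩
    | c :: rest =>
      have hr : rest.length ≤ N := Nat.le_of_succ_le_succ (by simpa using hl)
      constructor
      · intro i acc
        rw [PySem.List.enumerate_cons, List.foldl_cons]
        by_cases hc : pvCharged c
        · simp only [pvStepA, hc, if_pos]
          rw [pvGoB]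
          simp only [hc, if_pos]
          have e1 : i + (c :: rest).length = (i + 1) + rest.length := by simp; omega
          rw [e1, show ((i : Int) + 1) = (((i + 1 : Nat)) : Int) by push_cast; ring]
          rw [(ih rest hr).2 (i + 1) acc (i : Int)]
          have e2 : (i + 1) + (rest.takeWhile pvCharged).length
              = i + ((rest.takeWhile pvCharged).length + 1) := by omega
          rw [e2, List.append_assoc]
          congr 1
          split_ifs with h1 h2 <;> first | rfl | (exfalso; omega)
        · simp only [pvStepA, hc, Bool.false_eq_true, if_false]
          rw [pvGoB]
          simp only [hc, Bool.false_eq_true, if_false]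
          have e1 : i + (c :: rest).length = (i + 1) + rest.length := by simp; omega
          rw [e1, show ((i : Int) + 1) = (((i + 1 : Nat)) : Int) by push_cast; ring]
          rw [(ih rest hr).1 (i + 1) acc]
      · intro i acc s
        rw [PySem.List.enumerate_cons, List.foldl_cons]
        by_cases hc : pvCharged c
        · simp only [pvStepA, hc, if_pos]
          simp only [List.takeWhile_cons_of_pos hc, List.dropWhile_cons_of_pos hc]
          have e1 : i + (c :: rest).length = (i + 1) + rest.length := by simp; omega
          rw [e1, show ((i : Int) + 1) = (((i + 1 : Nat)) : Int) by push_cast; ring]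
          rw [(ih rest hr).2 (i + 1) acc s]
          have e2 : (i + 1) + (rest.takeWhile pvCharged).length
              = i + ((rest.takeWhile pvCharged).length + 1) := by omega
          rw [e2]
          simp only [List.length_cons]
        · simp only [pvStepA, hc, Bool.false_eq_true, if_false]
          simp only [List.takeWhile_cons_of_neg hc, List.dropWhile_cons_of_neg hc,
            List.length_nil, Nat.add_zero]
          have e1 : i + (c :: rest).length = (i + 1) + rest.length := by simp; omega
          rw [e1, show ((i : Int) + 1) = (((i + 1 : Nat)) : Int) by push_cast; ring]
          rw [(ih rest hr).1 (i + 1)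
            (if 2 ≤ (i : Int) - s then acc ++ [(s, (i : Int))] else acc)]
          rw [show pvGoB (c :: rest) i = pvGoB rest (i + 1) by rw [pvGoB]; simp [hc]]
          split_ifs with h <;> simp [List.append_assoc]

-- ===== VERDICT (by name: the statement is the Claim_ definition above) =====
theorem find_charged_regions_py_spec : Claim_equal_find_charged_regions_py := by
  intro sequence _
  unfold Spec_find_charged_regions_py find_charged_regions_py find_charged_regions_py_alt
  have h := (pvMain sequence.toList.length sequence.toList (le_refl _)).1 0 []
  simpa [PySem.Str.len_eq] using h
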